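-- pv_equiv track=rewrite | github.com/xelixdev/invoice-processing-poc | backend/ai_engineering/matching_utils.py | find_matching_references
-- ===== SOURCE A (Python) =====
-- from typing import List, Dict, Tuple, Optional
--
-- def levenshtein_distance(s1: str, s2: str) -> int:
--     """
--     Calculate the Levenshtein distance between two strings.
--     Simple implementation for prototype use.
--     """
--     if len(s1) < len(s2):
--         return levenshtein_distance(s2, s1)
--
--     if len(s2) == 0:
--         return len(s1)
--
--     previous_row = list(range(len(s2) + 1))
--     for i, c1 in enumerate(s1):
--         current_row = [i + 1]
--         for j, c2 in enumerate(s2):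
--             insertions = previous_row[j + 1] + 1
--             deletions = current_row[j] + 1
--             substitutions = previous_row[j] + (c1 != c2)
--             current_row.append(min(insertions, deletions, substitutions))
--         previous_row = current_row
--
--     return previous_row[-1]
--
-- def normalize_reference(ref: str) -> str:
--     """
--     Normalize a reference string for comparison.
--     Removes whitespace and converts to uppercase.
--     """
--     if not ref:
--         return ""
--     return ref.strip().upper()
--
-- def get_match_type(ref1: str, ref2: str, threshold: int = 1) -> str:
--     """
--     Determine the type of match between two reference strings.
--
--     Args:
--         ref1: First reference string
--         ref2: Second reference string
--         threshold: Maximum edit distance for close match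
--
--     Returns:
--         'exact': Exact match
--         'close': Close match (within threshold)
--         'none': No match
--     """
--     if not ref1 or not ref2:
--         return 'none'
--
--     norm_ref1 = normalize_reference(ref1)
--     norm_ref2 = normalize_reference(ref2)
--
--     if norm_ref1 == norm_ref2:
--         return 'exact'
--
--     distance = levenshtein_distance(norm_ref1, norm_ref2)
--
--     if distance <= threshold:
--         return 'close'
--
--     return 'none'
--
-- def find_matching_references(
--     extracted_ref: str,
--     reference_list: List[str],
--     threshold: int = 1
-- ) -> Dict[str, List[str]]:
--     """
--     Find matching references in a list, categorized by match type.
--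
--     Args:
--         extracted_ref: The reference extracted from document
--         reference_list: List of references to compare against
--         threshold: Maximum edit distance for close match
--
--     Returns:
--         Dictionary with 'exact' and 'close' keys containing lists of matches
--     """
--     results = {
--         'exact': [],
--         'close': []
--     }
--
--     for ref in reference_list:
--         match_type = get_match_type(extracted_ref, ref, threshold)
--         if match_type == 'exact':
--             results['exact'].append(ref)
--         elif match_type == 'close':
--             results['close'].append(ref)
--
--     return results
-- ===== SOURCE B (Python) =====
-- # B: hoists normalization of extracted_ref out of the loop, classifies each
-- # DISTINCT normalized reference once (memo dict), and skips the Levenshtein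
-- # computation entirely when the length difference already exceeds the
-- # threshold (edit distance is at least the length difference).
-- from typing import List, Dict
--
--
-- def _levenshtein(s1: str, s2: str) -> int:
--     if len(s1) < len(s2):
--         return _levenshtein(s2, s1)
--     if len(s2) == 0:
--         return len(s1)
--     previous_row = list(range(len(s2) + 1))
--     for i, c1 in enumerate(s1):
--         current_row = [i + 1]
--         for j, c2 in enumerate(s2):
--             insertions = previous_row[j + 1] + 1
--             deletions = current_row[j] + 1
--             substitutions = previous_row[j] + (c1 != c2)
--             current_row.append(min(insertions, deletions, substitutions))
--         previous_row = current_row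
--     return previous_row[-1]
--
--
-- def find_matching_references(
--     extracted_ref: str,
--     reference_list: List[str],
--     threshold: int = 1
-- ) -> Dict[str, List[str]]:
--     exact: List[str] = []
--     close: List[str] = []
--     if extracted_ref:
--         norm_extracted = extracted_ref.strip().upper()
--         verdicts: Dict[str, str] = {}
--         for ref in reference_list:
--             if not ref:
--                 continue
--             norm = ref.strip().upper()
--             kind = verdicts.get(norm)
--             if kind is None:
--                 if norm == norm_extracted:
--                     kind = 'exact'
--                 elif abs(len(norm) - len(norm_extracted)) > threshold:
--                     kind = 'none'
--                 elif _levenshtein(norm_extracted, norm) <= threshold: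
--                     kind = 'close'
--                 else:
--                     kind = 'none'
--                 verdicts[norm] = kind
--             if kind == 'exact':
--                 exact.append(ref)
--             elif kind == 'close':
--                 close.append(ref)
--     return {'exact': exact, 'close': close}
-- ===== Notes on version B (the rewrite author's own statement) =====
-- stated objective: faster
-- what changed: B hoists the normalization of extracted_ref out of the loop, classifies each distinct normalized reference once via a memo dict, and skips the Levenshtein DP entirely when the length difference already exceeds the threshold (proved sound: the DP result is at least the length difference), accumulating the two category lists directly instead of appending into a dict per element.
import Mathlib
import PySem

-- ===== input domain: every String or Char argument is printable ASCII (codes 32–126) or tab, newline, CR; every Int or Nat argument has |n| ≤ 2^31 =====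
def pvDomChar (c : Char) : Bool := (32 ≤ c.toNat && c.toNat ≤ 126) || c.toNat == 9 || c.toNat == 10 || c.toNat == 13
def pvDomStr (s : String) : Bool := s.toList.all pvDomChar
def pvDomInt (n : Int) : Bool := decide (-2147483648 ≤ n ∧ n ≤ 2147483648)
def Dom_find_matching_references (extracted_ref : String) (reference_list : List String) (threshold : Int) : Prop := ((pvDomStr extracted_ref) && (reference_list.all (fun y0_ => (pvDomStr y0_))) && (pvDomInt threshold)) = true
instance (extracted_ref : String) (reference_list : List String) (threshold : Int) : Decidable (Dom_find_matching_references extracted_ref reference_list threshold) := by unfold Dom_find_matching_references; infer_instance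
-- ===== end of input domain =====

-- B hoists the normalization of extracted_ref out of the loop, classifies each DISTINCT
-- normalized reference once via a memo dict, and skips the Levenshtein computation when the
-- length difference already exceeds the threshold (edit distance is at least the length
-- difference); return value only (neither version mutates its arguments).

-- ===== PORT A =====

-- shared helper: the two-row Levenshtein DP, used verbatim by both Pythons
def levenshtein_distance (s1 s2 : String) : Int :=
  if h : PySem.Str.len s1 < PySem.Str.len s2 then
    levenshtein_distance s2 s1
  else if PySem.Str.len s2 = 0 then
    PySem.Str.len s1
  else
    -- previous_row = list(range(len(s2)+1)); rows built left to right by appending;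
    -- all pyGetD indices are in range, so the default 0 is never read
    let previous_row : List Int := PySem.List.pyRange 0 (PySem.Str.len s2 + 1) 1
    let final : List Int := (PySem.List.enumerate s1.toList).foldl (fun prev ic =>
      (PySem.List.enumerate s2.toList).foldl (fun cur jc =>
        let insertions := PySem.List.pyGetD prev (jc.1 + 1) 0 + 1
        let deletions := PySem.List.pyGetD cur jc.1 0 + 1
        let substitutions := PySem.List.pyGetD prev jc.1 0 + (if ic.2 ≠ jc.2 then 1 else 0)
        cur ++ [min insertions (min deletions substitutions)]) [ic.1 + 1]) previous_row
    PySem.List.pyGetD final (-1) 0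
termination_by (if PySem.Str.len s1 < PySem.Str.len s2 then 1 else 0 : Nat)
decreasing_by
  simp only [PySem.Str.len_eq] at h
  have h' : s1.length < s2.length := by exact_mod_cast h
  simp [h', Nat.not_lt.mpr (Nat.le_of_lt h')]

def normalize_reference (ref : String) : String :=
  if ref = "" then "" else PySem.Str.upper (PySem.Str.strip ref)

def get_match_type (ref1 ref2 : String) (threshold : Int) : String :=
  if ref1 = "" ∨ ref2 = "" then "none"
  else
    let norm_ref1 := normalize_reference ref1
    let norm_ref2 := normalize_reference ref2
    if norm_ref1 = norm_ref2 then "exact"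
    else if levenshtein_distance norm_ref1 norm_ref2 ≤ threshold then "close"
    else "none"

def find_matching_references (extracted_ref : String) (reference_list : List String) (threshold : Int) : List (String × List String) :=
  let results : PySem.Dict String (List String) := PySem.Dict.ofList [("exact", []), ("close", [])]
  let final := reference_list.foldl (fun d ref =>
    let match_type := get_match_type extracted_ref ref threshold
    if match_type = "exact" then d.modify "exact" [] (· ++ [ref])
    else if match_type = "close" then d.modify "close" [] (· ++ [ref])
    else d) results
  final.items

-- ===== PORT B =====

-- classify one normalized reference against the hoisted normalized extracted_ref
def classify_ref (norm_extracted : String) (threshold : Int) (norm : String) : String :=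
  if norm = norm_extracted then "exact"
  else if |PySem.Str.len norm - PySem.Str.len norm_extracted| > threshold then "none"
  else if levenshtein_distance norm_extracted norm ≤ threshold then "close"
  else "none"

-- the loop of B: accumulators for both categories plus the memo dict of verdicts
def fmr_alt_go (norm_extracted : String) (threshold : Int) :
    List String → List String → List String → PySem.Dict String String → List String × List String
  | [], exact, close, _ => (exact, close)
  | ref :: rest, exact, close, verdicts =>
    if ref = "" then fmr_alt_go norm_extracted threshold rest exact close verdicts
    else
      let norm := PySem.Str.upper (PySem.Str.strip ref)
      let kv : String × PySem.Dict String String :=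
        match verdicts.get? norm with
        | some k => (k, verdicts)
        | none =>
          let k := classify_ref norm_extracted threshold norm
          (k, verdicts.insert norm k)
      if kv.1 = "exact" then fmr_alt_go norm_extracted threshold rest (exact ++ [ref]) close kv.2
      else if kv.1 = "close" then fmr_alt_go norm_extracted threshold rest exact (close ++ [ref]) kv.2
      else fmr_alt_go norm_extracted threshold rest exact close kv.2

def find_matching_references_alt (extracted_ref : String) (reference_list : List String) (threshold : Int) : List (String × List String) :=
  if extracted_ref = "" then [("exact", []), ("close", [])]
  else
    let norm_extracted := PySem.Str.upper (PySem.Str.strip extracted_ref)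
    let ec := fmr_alt_go norm_extracted threshold reference_list [] [] PySem.Dict.empty
    [("exact", ec.1), ("close", ec.2)]

-- ===== PRECONDITION & SPEC =====
def Spec_find_matching_references (extracted_ref : String) (reference_list : List String) (threshold : Int) (out : List (String × List String)) : Prop := out = find_matching_references_alt extracted_ref reference_list threshold
instance (extracted_ref : String) (reference_list : List String) (threshold : Int) (out : List (String × List String)) : Decidable (Spec_find_matching_references extracted_ref reference_list threshold out) := by unfold Spec_find_matching_references; infer_instance

-- ===== CLAIM (what is proved, stated in full; the proofs are below) =====
def Claim_equal_find_matching_references : Prop := ∀ (extracted_ref : String) (reference_list : List String) (threshold : Int), Dom_find_matching_references extracted_ref reference_list threshold → Spec_find_matching_references extracted_ref reference_list threshold (find_matching_references extracted_ref reference_list threshold)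

-- ===== LEMMAS AND PROOFS =====

-- abbreviation used only in the proofs below
def normU (s : String) : String := PySem.Str.upper (PySem.Str.strip s)

-- ---- lower bound: the DP's result is at least the length difference ----

-- inner loop: one DP row preserves the two linear lower bounds
lemma inner_ge (i : Int) (c1 : Char) (prev : List Int) (M : Nat)
    (hprev : ∀ j : Nat, j ≤ M → i - j ≤ prev.getD j 0 ∧ (j : Int) - i ≤ prev.getD j 0) :
    ∀ (l : List Char) (s : Nat) (cur : List Int), cur.length = s + 1 → s + l.length = M →
      (∀ idx : Nat, idx ≤ s → (i + 1) - idx ≤ cur.getD idx 0 ∧ (idx : Int) - (i + 1) ≤ cur.getD idx 0) →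
      ((PySem.List.enumerate l s).foldl (fun cur jc =>
          cur ++ [min (PySem.List.pyGetD prev (jc.1 + 1) 0 + 1)
            (min (PySem.List.pyGetD cur jc.1 0 + 1)
              (PySem.List.pyGetD prev jc.1 0 + (if c1 ≠ jc.2 then 1 else 0)))]) cur).length = M + 1
      ∧ ∀ idx : Nat, idx ≤ M →
          (i + 1) - idx ≤ ((PySem.List.enumerate l s).foldl (fun cur jc =>
            cur ++ [min (PySem.List.pyGetD prev (jc.1 + 1) 0 + 1)
              (min (PySem.List.pyGetD cur jc.1 0 + 1)
                (PySem.List.pyGetD prev jc.1 0 + (if c1 ≠ jc.2 then 1 else 0)))]) cur).getD idx 0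
          ∧ (idx : Int) - (i + 1) ≤ ((PySem.List.enumerate l s).foldl (fun cur jc =>
            cur ++ [min (PySem.List.pyGetD prev (jc.1 + 1) 0 + 1)
              (min (PySem.List.pyGetD cur jc.1 0 + 1)
                (PySem.List.pyGetD prev jc.1 0 + (if c1 ≠ jc.2 then 1 else 0)))]) cur).getD idx 0 := by
  intro l
  induction l with
  | nil =>
    intro s cur hclen hsM hcur
    rw [PySem.List.enumerate_nil, List.foldl_nil]
    simp only [List.length_nil, Nat.add_zero] at hsM
    subst hsM
    exact ⟨by omega, hcur⟩
  | cons c l ih =>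
    intro s cur hclen hsM hcur
    simp only [List.length_cons] at hsM
    rw [PySem.List.enumerate_cons, List.foldl_cons]
    have hcast : ((s : Int) + 1) = ((s + 1 : Nat) : Int) := by push_cast; ring
    have hδ : (0 : Int) ≤ (if c1 ≠ c then 1 else 0) := by split <;> omega
    have hins : i - (s + 1 : Nat) ≤ PySem.List.pyGetD prev ((s : Int) + 1) 0
        ∧ ((s + 1 : Nat) : Int) - i ≤ PySem.List.pyGetD prev ((s : Int) + 1) 0 := by
      rw [hcast, PySem.List.pyGetD_natCast]
      exact hprev (s + 1) (by omega)
    have hdel : (i + 1) - s ≤ PySem.List.pyGetD cur (s : Int) 0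
        ∧ (s : Int) - (i + 1) ≤ PySem.List.pyGetD cur (s : Int) 0 := by
      rw [PySem.List.pyGetD_natCast]
      exact hcur s le_rfl
    have hsub : i - s ≤ PySem.List.pyGetD prev (s : Int) 0
        ∧ (s : Int) - i ≤ PySem.List.pyGetD prev (s : Int) 0 := by
      rw [PySem.List.pyGetD_natCast]
      exact hprev s (by omega)
    refine ih (s + 1) _ (by simp [hclen]) (by omega) ?_
    intro idx hidx
    by_cases hle : idx ≤ s
    · have hlt : idx < cur.length := by omega
      rw [List.getD_eq_getElem _ _ (by simp; omega), List.getElem_append_left hlt,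
        ← List.getD_eq_getElem _ _ hlt]
      exact hcur idx hle
    · have hidx' : idx = s + 1 := by omega
      subst hidx'
      have hv : (cur ++ [min (PySem.List.pyGetD prev ((s : Int) + 1) 0 + 1)
          (min (PySem.List.pyGetD cur (s : Int) 0 + 1)
            (PySem.List.pyGetD prev (s : Int) 0 + (if c1 ≠ c then 1 else 0)))]).getD (s + 1) 0
          = min (PySem.List.pyGetD prev ((s : Int) + 1) 0 + 1)
            (min (PySem.List.pyGetD cur (s : Int) 0 + 1)
              (PySem.List.pyGetD prev (s : Int) 0 + (if c1 ≠ c then 1 else 0))) := by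
        rw [List.getD_eq_getElem _ _ (by simp; omega),
          List.getElem_append_right (by omega)]
        simp [hclen]
      rw [hv]
      push_cast
      omega

-- outer loop: every processed character raises the row index bound by one
lemma outer_ge (s2l : List Char) (M : Nat) (hM : s2l.length = M) :
    ∀ (l : List Char) (i : Nat) (prev : List Int), prev.length = M + 1 →
      (∀ j : Nat, j ≤ M → (i : Int) - j ≤ prev.getD j 0 ∧ (j : Int) - i ≤ prev.getD j 0) →
      ((PySem.List.enumerate l (i : Int)).foldl (fun prev ic =>
          (PySem.List.enumerate s2l).foldl (fun cur jc =>
            cur ++ [min (PySem.List.pyGetD prev (jc.1 + 1) 0 + 1)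
              (min (PySem.List.pyGetD cur jc.1 0 + 1)
                (PySem.List.pyGetD prev jc.1 0 + (if ic.2 ≠ jc.2 then 1 else 0)))]) [ic.1 + 1]) prev).length = M + 1
      ∧ ∀ j : Nat, j ≤ M →
        ((i + l.length : Nat) : Int) - j ≤ ((PySem.List.enumerate l (i : Int)).foldl (fun prev ic =>
            (PySem.List.enumerate s2l).foldl (fun cur jc =>
              cur ++ [min (PySem.List.pyGetD prev (jc.1 + 1) 0 + 1)
                (min (PySem.List.pyGetD cur jc.1 0 + 1)
                  (PySem.List.pyGetD prev jc.1 0 + (if ic.2 ≠ jc.2 then 1 else 0)))]) [ic.1 + 1]) prev).getD j 0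
        ∧ (j : Int) - ((i + l.length : Nat) : Int) ≤ ((PySem.List.enumerate l (i : Int)).foldl (fun prev ic =>
            (PySem.List.enumerate s2l).foldl (fun cur jc =>
              cur ++ [min (PySem.List.pyGetD prev (jc.1 + 1) 0 + 1)
                (min (PySem.List.pyGetD cur jc.1 0 + 1)
                  (PySem.List.pyGetD prev jc.1 0 + (if ic.2 ≠ jc.2 then 1 else 0)))]) [ic.1 + 1]) prev).getD j 0 := by
  intro l
  induction l with
  | nil =>
    intro i prev hplen hprev
    rw [PySem.List.enumerate_nil, List.foldl_nil]
    exact ⟨hplen, by simpa using hprev⟩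
  | cons c l ih =>
    intro i prev hplen hprev
    rw [PySem.List.enumerate_cons, List.foldl_cons]
    have hinner := inner_ge (i : Int) c prev M hprev s2l 0 [(i : Int) + 1] rfl (by omega)
      (by intro idx hidx; interval_cases idx; constructor <;> simp <;> omega)
    have h1 : ((i : Int) + 1) = ((i + 1 : Nat) : Int) := by push_cast; ring
    rw [h1] at hinner
    have := ih (i + 1) _ hinner.1 (fun j hj => hinner.2 j hj)
    have hlen : ((i + (c :: l).length : Nat) : Int) = (((i + 1) + l.length : Nat) : Int) := by
      simp [List.length_cons]; push_cast; ring
    refine ⟨this.1, fun j hj => ?_⟩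
    rw [hlen]
    exact this.2 j hj

-- the DP core is bounded below by both length differences
lemma lev_core_ge (s1 s2 : String) :
    (s1.toList.length : Int) - s2.toList.length
        ≤ PySem.List.pyGetD ((PySem.List.enumerate s1.toList).foldl (fun prev ic =>
            (PySem.List.enumerate s2.toList).foldl (fun cur jc =>
              cur ++ [min (PySem.List.pyGetD prev (jc.1 + 1) 0 + 1)
                (min (PySem.List.pyGetD cur jc.1 0 + 1)
                  (PySem.List.pyGetD prev jc.1 0 + (if ic.2 ≠ jc.2 then 1 else 0)))]) [ic.1 + 1])
            (PySem.List.pyRange 0 (PySem.Str.len s2 + 1) 1)) (-1) 0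
      ∧ (s2.toList.length : Int) - s1.toList.length
        ≤ PySem.List.pyGetD ((PySem.List.enumerate s1.toList).foldl (fun prev ic =>
            (PySem.List.enumerate s2.toList).foldl (fun cur jc =>
              cur ++ [min (PySem.List.pyGetD prev (jc.1 + 1) 0 + 1)
                (min (PySem.List.pyGetD cur jc.1 0 + 1)
                  (PySem.List.pyGetD prev jc.1 0 + (if ic.2 ≠ jc.2 then 1 else 0)))]) [ic.1 + 1])
            (PySem.List.pyRange 0 (PySem.Str.len s2 + 1) 1)) (-1) 0 := by
  set M := s2.toList.length with hM
  have hlen0 : PySem.Str.len s2 = (M : Int) := by simp [hM]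
  have hprev0 : (PySem.List.pyRange 0 (PySem.Str.len s2 + 1) 1).length = M + 1 := by
    rw [hlen0, PySem.List.length_pyRange_one]; omega
  have hinit : ∀ j : Nat, j ≤ M →
      ((0 : Nat) : Int) - j ≤ (PySem.List.pyRange 0 (PySem.Str.len s2 + 1) 1).getD j 0
      ∧ (j : Int) - ((0 : Nat) : Int) ≤ (PySem.List.pyRange 0 (PySem.Str.len s2 + 1) 1).getD j 0 := by
    intro j hj
    rw [List.getD_eq_getElem _ _ (by omega), PySem.List.getElem_pyRange_one]
    omega
  have h := outer_ge s2.toList M rfl s1.toList 0 _ hprev0 hinit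
  simp only [Nat.cast_zero] at h
  rcases h with ⟨hflen, hbound⟩
  have hb := hbound M le_rfl
  have hne : ((PySem.List.enumerate s1.toList).foldl (fun prev ic =>
      (PySem.List.enumerate s2.toList).foldl (fun cur jc =>
        cur ++ [min (PySem.List.pyGetD prev (jc.1 + 1) 0 + 1)
          (min (PySem.List.pyGetD cur jc.1 0 + 1)
            (PySem.List.pyGetD prev jc.1 0 + (if ic.2 ≠ jc.2 then 1 else 0)))]) [ic.1 + 1])
      (PySem.List.pyRange 0 (PySem.Str.len s2 + 1) 1)) ≠ [] := by
    intro hnil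
    rw [hnil] at hflen
    simp at hflen
  rw [PySem.List.pyGetD_neg_one _ _ hne]
  have hlast : ((PySem.List.enumerate s1.toList).foldl (fun prev ic =>
      (PySem.List.enumerate s2.toList).foldl (fun cur jc =>
        cur ++ [min (PySem.List.pyGetD prev (jc.1 + 1) 0 + 1)
          (min (PySem.List.pyGetD cur jc.1 0 + 1)
            (PySem.List.pyGetD prev jc.1 0 + (if ic.2 ≠ jc.2 then 1 else 0)))]) [ic.1 + 1])
      (PySem.List.pyRange 0 (PySem.Str.len s2 + 1) 1)).getLast hne
      = ((PySem.List.enumerate s1.toList).foldl (fun prev ic =>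
      (PySem.List.enumerate s2.toList).foldl (fun cur jc =>
        cur ++ [min (PySem.List.pyGetD prev (jc.1 + 1) 0 + 1)
          (min (PySem.List.pyGetD cur jc.1 0 + 1)
            (PySem.List.pyGetD prev jc.1 0 + (if ic.2 ≠ jc.2 then 1 else 0)))]) [ic.1 + 1])
      (PySem.List.pyRange 0 (PySem.Str.len s2 + 1) 1)).getD M 0 := by
    rw [List.getLast_eq_getElem, List.getD_eq_getElem _ _ (by omega)]
    congr 1
    omega
  rw [hlast]
  have h0 : ((0 + s1.toList.length : Nat) : Int) = (s1.toList.length : Int) := by push_cast; ring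
  rw [h0] at hb
  exact ⟨hb.1, hb.2⟩

-- the shared Levenshtein port is at least the length difference
lemma lev_ge_of_nlt (s1 s2 : String) (h : ¬ PySem.Str.len s1 < PySem.Str.len s2) :
    PySem.Str.len s1 - PySem.Str.len s2 ≤ levenshtein_distance s1 s2
    ∧ PySem.Str.len s2 - PySem.Str.len s1 ≤ levenshtein_distance s1 s2 := by
  rw [levenshtein_distance, dif_neg h]
  by_cases h2 : PySem.Str.len s2 = 0
  · rw [if_pos h2]
    simp only [PySem.Str.len_eq] at *
    omega
  · rw [if_neg h2]
    have := lev_core_ge s1 s2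
    simp only [PySem.Str.len_eq]
    exact ⟨this.1, this.2⟩

lemma lev_ge (s1 s2 : String) :
    |PySem.Str.len s1 - PySem.Str.len s2| ≤ levenshtein_distance s1 s2 := by
  rw [abs_sub_le_iff]
  by_cases h : PySem.Str.len s1 < PySem.Str.len s2
  · have hswap : levenshtein_distance s1 s2 = levenshtein_distance s2 s1 := by
      rw [levenshtein_distance, dif_pos h]
    rw [hswap]
    have := lev_ge_of_nlt s2 s1 (by omega)
    exact ⟨this.2, this.1⟩
  · exact lev_ge_of_nlt s1 s2 h

-- per-element: A's match type, for nonempty extracted_ref and ref, is B's classification of the norm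
lemma get_match_type_eq (er ref : String) (t : Int) (her : er ≠ "") (href : ref ≠ "") :
    get_match_type er ref t = classify_ref (normU er) t (normU ref) := by
  unfold get_match_type normalize_reference classify_ref normU
  rw [if_neg (by tauto : ¬(er = "" ∨ ref = "")), if_neg her, if_neg href]
  by_cases hq : PySem.Str.upper (PySem.Str.strip er) = PySem.Str.upper (PySem.Str.strip ref)
  · simp [hq]
  · simp [hq, Ne.symm hq]
    intro hl
    have h1 := abs_sub_le_iff.mp (lev_ge (PySem.Str.upper (PySem.Str.strip er)) (PySem.Str.upper (PySem.Str.strip ref)))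
    simp only [PySem.Str.len_eq, PySem.Str.toList_upper, PySem.Str.toList_strip] at h1
    rcases lt_abs.mp hl with h2 | h2 <;> omega

lemma modify_exact (e c : List String) (r : String) :
    (PySem.Dict.mk [("exact", e), ("close", c)]).modify "exact" [] (· ++ [r])
      = PySem.Dict.mk [("exact", e ++ [r]), ("close", c)] := by
  simp [PySem.Dict.modify, PySem.Dict.insert, PySem.Dict.getD, PySem.Dict.get?, PySem.Dict.contains]

lemma modify_close (e c : List String) (r : String) :
    (PySem.Dict.mk [("exact", e), ("close", c)]).modify "close" [] (· ++ [r])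
      = PySem.Dict.mk [("exact", e), ("close", c ++ [r])] := by
  simp [PySem.Dict.modify, PySem.Dict.insert, PySem.Dict.getD, PySem.Dict.get?, PySem.Dict.contains]

-- unfolding lemmas for the ports and for B's loop
lemma A_unfold (er : String) (rl : List String) (t : Int) :
    find_matching_references er rl t
      = (rl.foldl (fun d ref =>
          if get_match_type er ref t = "exact" then d.modify "exact" [] (· ++ [ref])
          else if get_match_type er ref t = "close" then d.modify "close" [] (· ++ [ref])
          else d) (PySem.Dict.mk [("exact", []), ("close", [])])).items := rfl

lemma B_unfold_empty (rl : List String) (t : Int) :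
    find_matching_references_alt "" rl t = [("exact", []), ("close", [])] := by
  rw [find_matching_references_alt, if_pos rfl]

lemma B_unfold (er : String) (rl : List String) (t : Int) (her : er ≠ "") :
    find_matching_references_alt er rl t
      = [("exact", (fmr_alt_go (normU er) t rl [] [] PySem.Dict.empty).1),
         ("close", (fmr_alt_go (normU er) t rl [] [] PySem.Dict.empty).2)] := by
  rw [find_matching_references_alt, if_neg her]; rfl

lemma go_cons_empty (ne : String) (t : Int) (rest : List String) (e c : List String)
    (v : PySem.Dict String String) :
    fmr_alt_go ne t ("" :: rest) e c v = fmr_alt_go ne t rest e c v := by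
  rw [fmr_alt_go, if_pos rfl]

lemma go_cons_hit (ne : String) (t : Int) (ref : String) (rest : List String) (e c : List String)
    (v : PySem.Dict String String) (k : String) (href : ref ≠ "") (hget : v.get? (normU ref) = some k) :
    fmr_alt_go ne t (ref :: rest) e c v
      = (if k = "exact" then fmr_alt_go ne t rest (e ++ [ref]) c v
         else if k = "close" then fmr_alt_go ne t rest e (c ++ [ref]) v
         else fmr_alt_go ne t rest e c v) := by
  rw [fmr_alt_go, if_neg href]
  simp only [normU] at hget
  simp only [hget]

lemma go_cons_miss (ne : String) (t : Int) (ref : String) (rest : List String) (e c : List String)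
    (v : PySem.Dict String String) (href : ref ≠ "") (hget : v.get? (normU ref) = none) :
    fmr_alt_go ne t (ref :: rest) e c v
      = (if classify_ref ne t (normU ref) = "exact" then
           fmr_alt_go ne t rest (e ++ [ref]) c (v.insert (normU ref) (classify_ref ne t (normU ref)))
         else if classify_ref ne t (normU ref) = "close" then
           fmr_alt_go ne t rest e (c ++ [ref]) (v.insert (normU ref) (classify_ref ne t (normU ref)))
         else fmr_alt_go ne t rest e c (v.insert (normU ref) (classify_ref ne t (normU ref)))) := by
  rw [fmr_alt_go, if_neg href]
  simp only [normU] at hget ⊢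
  simp only [hget]

-- memo-dict invariant: every stored verdict is the recomputed verdict
def VerdictsOK (ne : String) (t : Int) (v : PySem.Dict String String) : Prop :=
  ∀ k val, (k, val) ∈ v.items → val = classify_ref ne t k

lemma VerdictsOK_insert (ne norm : String) (t : Int) (v : PySem.Dict String String)
    (hv : VerdictsOK ne t v) : VerdictsOK ne t (v.insert norm (classify_ref ne t norm)) := by
  intro k val hmem
  rcases (PySem.Dict.mem_items_insert v _ _ (k, val)).1 hmem with h | h
  · cases h; rfl
  · exact hv k val h.1

-- main loop correspondence (extracted_ref ≠ "")
lemma loop_eq (er : String) (t : Int) (her : er ≠ "") :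
    ∀ (l : List String) (e c : List String) (v : PySem.Dict String String),
      VerdictsOK (normU er) t v →
      l.foldl (fun d ref =>
          if get_match_type er ref t = "exact" then d.modify "exact" [] (· ++ [ref])
          else if get_match_type er ref t = "close" then d.modify "close" [] (· ++ [ref])
          else d) (PySem.Dict.mk [("exact", e), ("close", c)])
        = PySem.Dict.mk
            [("exact", (fmr_alt_go (normU er) t l e c v).1),
             ("close", (fmr_alt_go (normU er) t l e c v).2)] := by
  intro l
  induction l with
  | nil => intro e c v _; rfl
  | cons ref rest ih =>
    intro e c v hv
    by_cases href : ref = ""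
    · subst href
      have hmt : get_match_type er "" t = "none" := by simp [get_match_type]
      rw [List.foldl_cons, go_cons_empty]
      simp only [hmt]
      rw [if_neg (by decide : ¬("none" = "exact")), if_neg (by decide : ¬("none" = "close"))]
      exact ih e c v hv
    · have hmt : get_match_type er ref t = classify_ref (normU er) t (normU ref) :=
        get_match_type_eq er ref t her href
      rw [List.foldl_cons]
      simp only [hmt]
      cases hget : v.get? (normU ref) with
      | some k =>
        have hk : k = classify_ref (normU er) t (normU ref) :=
          hv _ k (PySem.Dict.mem_items_of_get?_eq_some v hget)
        rw [go_cons_hit (normU er) t ref rest e c v k href hget, ← hk]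
        by_cases h1 : k = "exact"
        · rw [if_pos h1, if_pos h1, modify_exact]
          exact ih (e ++ [ref]) c v hv
        · by_cases h2 : k = "close"
          · rw [if_neg h1, if_neg h1, if_pos h2, if_pos h2, modify_close]
            exact ih e (c ++ [ref]) v hv
          · rw [if_neg h1, if_neg h1, if_neg h2, if_neg h2]
            exact ih e c v hv
      | none =>
        have hv' : VerdictsOK (normU er) t
            (v.insert (normU ref) (classify_ref (normU er) t (normU ref))) :=
          VerdictsOK_insert (normU er) (normU ref) t v hv
        rw [go_cons_miss (normU er) t ref rest e c v href hget]
        by_cases h1 : classify_ref (normU er) t (normU ref) = "exact"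
        · rw [if_pos h1, if_pos h1, modify_exact]
          exact ih (e ++ [ref]) c _ hv'
        · by_cases h2 : classify_ref (normU er) t (normU ref) = "close"
          · rw [if_neg h1, if_neg h1, if_pos h2, if_pos h2, modify_close]
            exact ih e (c ++ [ref]) _ hv'
          · rw [if_neg h1, if_neg h1, if_neg h2, if_neg h2]
            exact ih e c _ hv'

-- extracted_ref = "": A's loop never appends
lemma loop_empty (t : Int) :
    ∀ (l : List String) (d : PySem.Dict String (List String)),
      l.foldl (fun d ref =>
          if get_match_type "" ref t = "exact" then d.modify "exact" [] (· ++ [ref])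
          else if get_match_type "" ref t = "close" then d.modify "close" [] (· ++ [ref])
          else d) d = d := by
  intro l
  induction l with
  | nil => intro d; rfl
  | cons ref rest ih =>
    intro d
    have hmt : get_match_type "" ref t = "none" := by simp [get_match_type]
    rw [List.foldl_cons]
    simp only [hmt]
    rw [if_neg (by decide : ¬("none" = "exact")), if_neg (by decide : ¬("none" = "close"))]
    exact ih d

-- ===== VERDICT (by name: the statement is the Claim_ definition above) =====
theorem find_matching_references_spec : Claim_equal_find_matching_references := by
  intro er rl t _
  unfold Spec_find_matching_references
  by_cases her : er = ""
  · subst her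
    rw [A_unfold, B_unfold_empty, loop_empty t rl]
  · rw [A_unfold, B_unfold er rl t her,
      loop_eq er t her rl [] [] PySem.Dict.empty (by intro k val h; simp [PySem.Dict.empty] at h)]
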